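-- pv_equiv track=rewrite | github.com/JAMC980/AED_CAP11 | AED Cap11/cap_11.4.py | multiplicative_hash
-- ===== SOURCE A (Python) =====
-- def multiplicative_hash(key, size):
--     # prime numbers for multiplication and addition
--     P1 = 73856093
--     P2 = 19349663
--
--     # convert integer key to bytes and iterate over them
--     bytes_key = key.to_bytes((key.bit_length() + 7) // 8, 'big')
--     hash_val = 0
--     for byte in bytes_key:
--         hash_val = (hash_val * P1 + byte * P2) % size
--
--     return hash_val
-- ===== SOURCE B (Python) =====
-- def multiplicative_hash(key, size):
--     P1 = 73856093
--     P2 = 19349663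
--     # walk the base-256 digits least-significant-first, tracking a running power of P1 (mod size)
--     hash_val = 0
--     power = 1
--     n = key
--     while n > 0:
--         n, byte = divmod(n, 256)
--         hash_val = (hash_val + byte * P2 * power) % size
--         power = power * P1 % size
--     return hash_val
-- ===== Notes on version B (the rewrite author's own statement) =====
-- stated objective: alternative
-- what changed: B replaces A's big-endian Horner fold over the to_bytes list with a least-significant-digit-first loop over divmod(n, 256) that maintains a running power of P1 mod size and adds byte*P2*power each step; no byte list is materialized.
import Mathlib
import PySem

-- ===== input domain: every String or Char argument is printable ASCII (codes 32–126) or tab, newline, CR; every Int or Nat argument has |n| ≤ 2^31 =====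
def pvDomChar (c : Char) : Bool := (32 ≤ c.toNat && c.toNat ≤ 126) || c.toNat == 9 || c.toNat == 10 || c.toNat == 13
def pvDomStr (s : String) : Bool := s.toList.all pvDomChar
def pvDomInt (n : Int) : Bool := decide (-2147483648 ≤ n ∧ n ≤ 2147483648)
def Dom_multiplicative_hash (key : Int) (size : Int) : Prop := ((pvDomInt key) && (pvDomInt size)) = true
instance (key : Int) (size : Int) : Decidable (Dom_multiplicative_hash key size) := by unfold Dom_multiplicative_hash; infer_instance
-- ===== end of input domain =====

-- B walks the base-256 digits least-significant-first with a running power of P1 (mod size)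
-- instead of A's most-significant-first Horner fold over the to_bytes list; objective: alternative decomposition.

-- ===== PORT A =====
-- key.to_bytes((key.bit_length() + 7) // 8, 'big'): the minimal big-endian byte list of a
-- nonnegative integer (exact for 0 ≤ key; a negative key raises OverflowError in Python and
-- is excluded by Pre_).
def pyToBytesBE (n : Nat) : List Int :=
  if hz : n = 0 then []
  else pyToBytesBE (n / 256) ++ [((n % 256 : Nat) : Int)]
termination_by n
decreasing_by exact Nat.div_lt_self (Nat.pos_of_ne_zero hz) (by omega)

def multiplicative_hash (key : Int) (size : Int) : Int :=
  -- for byte in bytes_key: hash_val = (hash_val * P1 + byte * P2) % size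
  (pyToBytesBE key.toNat).foldl
    (fun hash_val byte => PySem.Int.mod (hash_val * 73856093 + byte * 19349663) size) 0

-- ===== PORT B =====
-- while n > 0: n, byte = divmod(n, 256); hash_val = (hash_val + byte*P2*power) % size; power = power*P1 % size
def altLoop (size : Int) (n : Nat) (hash_val power : Int) : Int :=
  if h : n = 0 then hash_val
  else altLoop size (n / 256)
        (PySem.Int.mod (hash_val + ((n % 256 : Nat) : Int) * 19349663 * power) size)
        (PySem.Int.mod (power * 73856093) size)
termination_by n
decreasing_by exact Nat.div_lt_self (Nat.pos_of_ne_zero h) (by omega)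

def multiplicative_hash_alt (key : Int) (size : Int) : Int :=
  -- n = key; the loop only runs while n > 0, so toNat is exact for the loop's domain
  altLoop size key.toNat 0 1

-- ===== PRECONDITION & SPEC =====
-- Pre_ excludes exactly the inputs where Python A raises: key < 0 (OverflowError from
-- to_bytes) and size = 0 with key > 0 (ZeroDivisionError from '% size').
def Pre_multiplicative_hash (key : Int) (size : Int) : Prop :=
  0 ≤ key ∧ (size ≠ 0 ∨ key = 0)
instance (key : Int) (size : Int) : Decidable (Pre_multiplicative_hash key size) := by
  unfold Pre_multiplicative_hash; infer_instance

def pvWitness_multiplicative_hash : Int × Int := (123456, 97)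

def Spec_multiplicative_hash (key : Int) (size : Int) (out : Int) : Prop := out = multiplicative_hash_alt key size
instance (key : Int) (size : Int) (out : Int) : Decidable (Spec_multiplicative_hash key size out) := by unfold Spec_multiplicative_hash; infer_instance

-- ===== CLAIM (what is proved, stated in full; the proofs are below) =====
def Claim_equal_multiplicative_hash : Prop := ∀ (key : Int) (size : Int), Dom_multiplicative_hash key size → Pre_multiplicative_hash key size → Spec_multiplicative_hash key size (multiplicative_hash key size)

-- ===== LEMMAS AND PROOFS =====

-- s divides (a % s) - a  (floor mod, every s)
theorem pymod_sub_self_dvd (a s : Int) : s ∣ (PySem.Int.mod a s - a) :=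
  ⟨-(PySem.Int.floordiv a s), by
    have h := PySem.Int.floordiv_mul_add_mod a s
    linear_combination h⟩

-- floor mod respects congruence (every s: for s = 0 the hypothesis forces a = b)
theorem pymod_congr (a b s : Int) (h : s ∣ (a - b)) :
    PySem.Int.mod a s = PySem.Int.mod b s := by
  have hm : a ≡ b [ZMOD s] := Int.modEq_iff_dvd.mpr (by simpa using (dvd_neg.mpr h))
  have hab : a % s = b % s := hm
  have hdvd : (s ∣ a) ↔ (s ∣ b) :=
    ⟨fun hd => by simpa using dvd_sub hd h, fun hd => by simpa using dvd_add h hd⟩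
  show Int.fmod a s = Int.fmod b s
  rw [Int.fmod_eq_emod, Int.fmod_eq_emod, hab]
  simp only [hdvd]

-- the exact (un-modded) Horner value of the byte expansion of n, started from h
def pureA (h : Int) (n : Nat) : Int :=
  if hn : n = 0 then h
  else pureA h (n / 256) * 73856093 + ((n % 256 : Nat) : Int) * 19349663
termination_by n
decreasing_by exact Nat.div_lt_self (Nat.pos_of_ne_zero hn) (by omega)

-- A's fold computes the canonical residue of the pure Horner value (nonempty byte list)
theorem foldA_eq (s : Int) : ∀ n : Nat, 0 < n → ∀ h : Int,
    (pyToBytesBE n).foldl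
      (fun hv b => PySem.Int.mod (hv * 73856093 + b * 19349663) s) h
    = PySem.Int.mod (pureA h n) s := by
  intro n
  induction n using Nat.strong_induction_on with
  | _ n ih =>
    intro hn h
    rw [pyToBytesBE, dif_neg (show ¬ n = 0 by omega)]
    by_cases hq : n / 256 = 0
    · rw [hq, pyToBytesBE, dif_pos rfl]
      simp only [List.nil_append, List.foldl_cons, List.foldl_nil]
      conv_rhs => rw [pureA, dif_neg (show ¬ n = 0 by omega), hq, pureA, dif_pos rfl]
    · have hlt : n / 256 < n := Nat.div_lt_self hn (by omega)
      rw [List.foldl_append, ih (n / 256) hlt (by omega) h]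
      simp only [List.foldl_cons, List.foldl_nil]
      conv_rhs => rw [pureA, dif_neg (show ¬ n = 0 by omega)]
      apply pymod_congr
      obtain ⟨c, hc⟩ := pymod_sub_self_dvd (pureA h (n / 256)) s
      exact ⟨c * 73856093, by linear_combination 73856093 * hc⟩

-- B's loop computes the canonical residue of acc + power * (pure polynomial value)
theorem altLoop_eq (s : Int) : ∀ n : Nat, 0 < n → ∀ acc power : Int,
    altLoop s n acc power = PySem.Int.mod (acc + power * pureA 0 n) s := by
  intro n
  induction n using Nat.strong_induction_on with
  | _ n ih =>
    intro hn acc power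
    rw [altLoop, dif_neg (show ¬ n = 0 by omega)]
    by_cases hq : n / 256 = 0
    · rw [hq, altLoop, dif_pos rfl]
      conv_rhs => rw [pureA, dif_neg (show ¬ n = 0 by omega), hq, pureA, dif_pos rfl]
      apply pymod_congr
      exact ⟨0, by ring⟩
    · have hlt : n / 256 < n := Nat.div_lt_self hn (by omega)
      rw [ih (n / 256) hlt (by omega)]
      conv_rhs => rw [pureA, dif_neg (show ¬ n = 0 by omega)]
      apply pymod_congr
      obtain ⟨c1, hc1⟩ := pymod_sub_self_dvd (acc + ((n % 256 : Nat) : Int) * 19349663 * power) s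
      obtain ⟨c2, hc2⟩ := pymod_sub_self_dvd (power * 73856093) s
      exact ⟨c1 + c2 * pureA 0 (n / 256), by linear_combination hc1 + pureA 0 (n / 256) * hc2⟩

-- ===== VERDICT (by name: the statement is the Claim_ definition above) =====
theorem multiplicative_hash_spec : Claim_equal_multiplicative_hash := by
  intro key size _ _
  show multiplicative_hash key size = multiplicative_hash_alt key size
  unfold multiplicative_hash multiplicative_hash_alt
  by_cases h0 : key.toNat = 0
  · rw [h0]
    rw [pyToBytesBE, dif_pos rfl, altLoop, dif_pos rfl]
    rfl
  · rw [foldA_eq size key.toNat (by omega), altLoop_eq size key.toNat (by omega)]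
    congr 1
    ring
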